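-- pv_equiv track=rewrite | github.com/sklprogs/mclient | src/converters/dsl/mdic.py | _get_abbr
-- ===== SOURCE A (Python) =====
-- def _get_abbr(wform):
--     abbr = [char for char in wform.lower() if str(char).isalpha()]
--     abbr = ''.join(abbr)
--     abbr = abbr[0:2]
--     ''' If abbr is empty and there is no extension, the app tries to save
--         the file as a directory and fails. Either use an extension or
--         do not allow an empty name.
--     '''
--     if not abbr:
--         abbr = 'unknown'
--     return abbr
-- ===== SOURCE B (Python) =====
-- def _get_abbr(wform):
--     abbr = ''
--     for char in wform:
--         c = char.lower()
--         if c.isalpha():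
--             abbr += c
--             if len(abbr) == 2:
--                 break
--     if not abbr:
--         abbr = 'unknown'
--     return abbr
-- ===== Notes on version B (the rewrite author's own statement) =====
-- stated objective: alternative
-- what changed: Replaces the full filter-comprehension + join + slice with a single early-exit loop that lowercases characters as it goes and stops as soon as two alphabetic characters have been collected.
import Mathlib
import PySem

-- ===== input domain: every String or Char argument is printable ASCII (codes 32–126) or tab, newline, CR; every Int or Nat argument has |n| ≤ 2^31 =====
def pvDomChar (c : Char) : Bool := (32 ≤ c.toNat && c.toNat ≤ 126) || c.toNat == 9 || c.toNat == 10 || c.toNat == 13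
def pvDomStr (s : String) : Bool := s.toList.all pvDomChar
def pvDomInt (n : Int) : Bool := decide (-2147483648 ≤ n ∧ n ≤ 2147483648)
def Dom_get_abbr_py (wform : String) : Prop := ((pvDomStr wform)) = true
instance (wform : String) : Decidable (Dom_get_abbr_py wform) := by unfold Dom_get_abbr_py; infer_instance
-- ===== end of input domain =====

-- B replaces A's full filter + join + slice with a single early-exit loop that
-- stops once two alphabetic characters are collected (objective: alternative).

-- ===== PORT A =====
def get_abbr_py (wform : String) : String :=
  let abbr : List Char := (PySem.Str.lower wform).toList.filter (fun c => PySem.Chars.isalpha c)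
  let abbr : String := String.ofList abbr           -- ''.join(abbr)
  let abbr : String := String.ofList (PySem.List.slice abbr.toList (some 0) (some 2))  -- abbr[0:2]
  if abbr = "" then "unknown" else abbr

-- ===== PORT B =====
def altLoop (acc : List Char) : List Char → List Char
  | [] => acc
  | ch :: rest =>
    let c := PySem.Chars.lowerChar ch
    if PySem.Chars.isalpha c then
      let acc2 := acc ++ [c]
      if acc2.length = 2 then acc2 else altLoop acc2 rest
    else altLoop acc rest

def get_abbr_py_alt (wform : String) : String :=
  let abbr := altLoop [] wform.toList
  if abbr = [] then "unknown" else String.ofList abbr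

-- ===== PRECONDITION & SPEC =====
def Spec_get_abbr_py (wform : String) (out : String) : Prop := out = get_abbr_py_alt wform
instance (wform : String) (out : String) : Decidable (Spec_get_abbr_py wform out) := by unfold Spec_get_abbr_py; infer_instance

-- ===== CLAIM (what is proved, stated in full; the proofs are below) =====
def Claim_equal_get_abbr_py : Prop := ∀ (wform : String), Dom_get_abbr_py wform → Spec_get_abbr_py wform (get_abbr_py wform)

-- ===== LEMMAS AND PROOFS =====
lemma altLoop_eq (cs : List Char) : ∀ (acc : List Char), acc.length < 2 →
    altLoop acc cs
      = (acc ++ (cs.map PySem.Chars.lowerChar).filter (fun c => PySem.Chars.isalpha c)).take 2 := by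
  induction cs with
  | nil =>
      intro acc h
      simp [altLoop, List.take_of_length_le (show acc.length ≤ 2 by omega)]
  | cons ch rest ih =>
      intro acc h
      by_cases ha : PySem.Chars.isalpha (PySem.Chars.lowerChar ch) = true
      · by_cases hl : (acc ++ [PySem.Chars.lowerChar ch]).length = 2
        · simp only [altLoop, ha, hl, if_true]
          rw [List.map_cons, List.filter_cons_of_pos (by simpa using ha),
            show acc ++ PySem.Chars.lowerChar ch ::
                (List.map PySem.Chars.lowerChar rest).filter (fun c => PySem.Chars.isalpha c)
              = (acc ++ [PySem.Chars.lowerChar ch]) ++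
                (List.map PySem.Chars.lowerChar rest).filter (fun c => PySem.Chars.isalpha c)
              from by simp,
            List.take_append_of_le_length (le_of_eq hl.symm),
            List.take_of_length_le (le_of_eq hl)]
        · simp only [altLoop, ha, hl, if_true, if_false]
          rw [ih _ (by simp only [List.length_append, List.length_cons,
            List.length_nil] at hl ⊢; omega)]
          simp [List.filter_cons_of_pos (by simpa using ha)]
      · simp only [altLoop, ha]
        rw [ih _ h]
        simp [List.filter_cons_of_neg (by simpa using ha)]

lemma slice_0_2 (xs : List Char) : PySem.List.slice xs (some 0) (some 2) = xs.take 2 := by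
  simpa using PySem.List.slice_to_natCast xs 2

-- ===== VERDICT (by name: the statement is the Claim_ definition above) =====
theorem get_abbr_py_spec : Claim_equal_get_abbr_py := by
  intro wform _
  unfold Spec_get_abbr_py get_abbr_py get_abbr_py_alt
  rw [altLoop_eq _ _ (by simp)]
  simp only [List.nil_append, PySem.Str.toList_lower]
  have hlow : PySem.Chars.lower wform.toList = wform.toList.map PySem.Chars.lowerChar := rfl
  simp only [hlow, slice_0_2, String.toList_ofList]
  set f := (wform.toList.map PySem.Chars.lowerChar).filter (fun c => PySem.Chars.isalpha c) with hf
  by_cases h : f.take 2 = []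
  · simp [h]
  · simp [h]
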